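-- pv_equiv track=rewrite | github.com/pypi-data/pypi-mirror-402 | packages/skyramp/skyramp-1.3.4-py3-none-any.whl/skyramp/smart_playwright.py | parse_error_stack
-- ===== SOURCE A (Python) =====
-- def parse_error_stack(stack):
--     """parse error stack to find the line that is replaced by llm"""
--     stack_lines = stack.split('\n')
--
--     prev = ""
--     is_file_path = True
--     for l in stack_lines:
--         if not is_file_path:
--             is_file_path = True
--             continue
--
--         is_file_path = False
--         if "src/skyramp" in l:
--             break
--
--         prev = l
--
--     return prev
-- ===== SOURCE B (Python) =====
-- def parse_error_stack(stack):
--     """parse error stack to find the line that is replaced by llm"""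
--     evens = stack.split('\n')[::2]
--     hits = [k for k, l in enumerate(evens) if "src/skyramp" in l]
--     j = hits[0] if hits else len(evens)
--     return evens[j - 1] if j >= 1 else ""
-- ===== Notes on version B (the rewrite author's own statement) =====
-- stated objective: alternative
-- what changed: A's stateful is_file_path toggle scan with break is replaced by staged passes: slice the even-indexed lines, collect the indices of marker-containing lines with enumerate, and index directly to the line before the first hit (or the last even line if none), eliminating loop state and control flow.
import Mathlib
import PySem

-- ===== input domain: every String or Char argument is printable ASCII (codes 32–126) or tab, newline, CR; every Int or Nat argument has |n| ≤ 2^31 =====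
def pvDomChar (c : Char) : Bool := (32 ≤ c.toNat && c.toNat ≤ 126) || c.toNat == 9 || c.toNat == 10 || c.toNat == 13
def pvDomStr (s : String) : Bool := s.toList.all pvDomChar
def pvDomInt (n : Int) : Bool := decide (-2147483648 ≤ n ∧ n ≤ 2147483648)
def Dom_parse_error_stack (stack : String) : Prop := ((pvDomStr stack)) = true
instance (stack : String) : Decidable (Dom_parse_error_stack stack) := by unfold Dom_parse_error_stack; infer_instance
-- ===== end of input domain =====

-- B replaces A's stateful toggle/continue scan by staged passes: slice the even-indexed
-- lines, collect the indices of marker lines, and index directly to the line before the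
-- first marker (objective: simpler, no scan state).

-- ===== PORT A =====
-- the for-loop of A: state (prev, is_file_path), 'break' returns prev
def parseALoop : List String → String → Bool → String
  | [], prev, _ => prev
  | l :: rest, prev, isFilePath =>
    if !isFilePath then
      parseALoop rest prev true            -- is_file_path = True; continue
    else
      if PySem.Str.isIn "src/skyramp" l then prev   -- break
      else parseALoop rest l false         -- prev = l (is_file_path = False)

def parse_error_stack (stack : String) : String :=
  parseALoop ((PySem.Str.split? stack "\n").getD []) "" true
  -- split? is some since the separator "\n" is non-empty

-- ===== PORT B =====
-- hits = [k for k, l in enumerate(evens) if "src/skyramp" in l]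
def bHits (ys : List String) : List Int :=
  ((PySem.List.enumerate ys 0).filter (fun p => PySem.Str.isIn "src/skyramp" p.2)).map Prod.fst

def parse_error_stack_alt (stack : String) : String :=
  let evens := (PySem.List.slice? ((PySem.Str.split? stack "\n").getD []) none none 2).getD []
  -- slice? is some since the step 2 is non-zero; split? is some since "\n" is non-empty
  let j := (bHits evens).head?.getD (evens.length : Int)
  if j ≥ 1 then (PySem.List.pyGet? evens (j - 1)).getD "" else ""
  -- the index j - 1 is in range whenever j ≥ 1, so pyGet? is some there

-- ===== PRECONDITION & SPEC =====
def Spec_parse_error_stack (stack : String) (out : String) : Prop := out = parse_error_stack_alt stack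
instance (stack : String) (out : String) : Decidable (Spec_parse_error_stack stack out) := by unfold Spec_parse_error_stack; infer_instance

-- ===== CLAIM (what is proved, stated in full; the proofs are below) =====
def Claim_equal_parse_error_stack : Prop := ∀ (stack : String), Dom_parse_error_stack stack → Spec_parse_error_stack stack (parse_error_stack stack)

-- ===== LEMMAS AND PROOFS =====

-- the even-indexed elements of a list
def everyOther {α : Type} : List α → List α
  | [] => []
  | [x] => [x]
  | x :: _ :: rest => x :: everyOther rest

lemma fm_every {α : Type} (xs : List α) :
    List.filterMap (fun (k : Nat) => xs[(2 * (k : Int)).toNat]?)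
      (List.range ((((xs.length : Int) + 2 - 1) / 2).toNat)) = everyOther xs := by
  induction xs using everyOther.induct with
  | case1 => simp [everyOther]
  | case2 x => norm_num [everyOther, List.range_succ, List.filterMap_cons]
  | case3 x y rest ih =>
    have hc : ((((x :: y :: rest).length : Int) + 2 - 1) / 2).toNat
        = ((((rest.length : Int) + 2 - 1) / 2).toNat) + 1 := by
      simp only [List.length_cons]; push_cast; omega
    rw [hc, List.range_succ_eq_map, List.filterMap_cons, List.filterMap_map]
    norm_num [everyOther]
    rw [List.filterMap_congr (g := fun (k : Nat) => rest[(2 * (k : Int)).toNat]?) ?_, ih]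
    intro k hk
    have h2 : (2 * ((k : Int) + 1)).toNat = (2 * (k : Int)).toNat + 1 + 1 := by omega
    simp only [h2, List.getElem?_cons_succ]

lemma slice_step_two {α : Type} (xs : List α) :
    PySem.List.slice? xs none none 2 = some (everyOther xs) := by
  simp only [PySem.List.slice?, PySem.List.sliceIndices]
  norm_num
  cases xs with
  | nil => simp [everyOther]
  | cons a l =>
    rw [if_pos (by simp)]
    exact fm_every (a :: l)

-- a plain break-on-marker scan over the even-indexed lines: the common middle ground
def scanEvens : List String → String → String
  | [], prev => prev
  | l :: rest, prev =>
    if PySem.Str.isIn "src/skyramp" l then prev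
    else scanEvens rest l

lemma loopA_eq_scan (xs : List String) (prev : String) :
    parseALoop xs prev true = scanEvens (everyOther xs) prev := by
  induction xs using everyOther.induct generalizing prev with
  | case1 => rfl
  | case2 x => simp [parseALoop, scanEvens, everyOther]
  | case3 x y rest ih =>
    cases h : PySem.Str.isIn "src/skyramp" x with
    | true =>
      simp only [everyOther, parseALoop, scanEvens, Bool.not_true, Bool.not_false, h,
        Bool.false_eq_true, if_false, reduceIte]
    | false =>
      simp only [everyOther, parseALoop, scanEvens, Bool.not_true, Bool.not_false, h,
        Bool.false_eq_true, if_false, reduceIte]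
      exact ih x

-- bHits generalised over the enumerate start
def bHitsFrom (ys : List String) (s : Int) : List Int :=
  ((PySem.List.enumerate ys s).filter (fun p => PySem.Str.isIn "src/skyramp" p.2)).map Prod.fst

lemma bHitsFrom_nil (s : Int) : bHitsFrom [] s = [] := rfl

lemma bHitsFrom_cons (l : String) (rest : List String) (s : Int) :
    bHitsFrom (l :: rest) s =
      (if PySem.Str.isIn "src/skyramp" l then [s] else []) ++ bHitsFrom rest (s + 1) := by
  simp only [bHitsFrom, PySem.List.enumerate_cons, List.filter_cons]
  split_ifs <;> simp

lemma bHitsFrom_mem_ge (ys : List String) (s : Int) (x : Int) (hx : x ∈ bHitsFrom ys s) :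
    s ≤ x := by
  induction ys generalizing s with
  | nil => simp [bHitsFrom_nil] at hx
  | cons l rest ih =>
    rw [bHitsFrom_cons] at hx
    rcases List.mem_append.mp hx with h | h
    · split_ifs at h <;> simp_all
    · have := ih (s + 1) h; omega

lemma scan_eq_hits (ys : List String) : ∀ (s : Int) (prev : String),
    scanEvens ys prev =
      (if (bHitsFrom ys s).head?.getD (s + ys.length) ≥ s + 1 then
        (PySem.List.pyGet? ys ((bHitsFrom ys s).head?.getD (s + ys.length) - 1 - s)).getD ""
      else prev) := by
  induction ys with
  | nil =>
    intro s prev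
    simp only [scanEvens, bHitsFrom_nil, List.head?_nil, Option.getD_none, List.length_nil]
    norm_num
  | cons l rest ih =>
    intro s prev
    rw [bHitsFrom_cons]
    cases h : PySem.Str.isIn "src/skyramp" l with
    | true =>
      simp only [scanEvens, h, if_true, List.cons_append, List.head?_cons, Option.getD_some]
      rw [if_neg (by omega)]
    | false =>
      simp only [scanEvens, h, Bool.false_eq_true, if_false, List.nil_append]
      have hlen : s + ((l :: rest).length : Int) = s + 1 + rest.length := by
        simp only [List.length_cons]; push_cast; ring
      rw [ih (s + 1) l, hlen]
      have hge : (bHitsFrom rest (s + 1)).head?.getD (s + 1 + rest.length) ≥ s + 1 := by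
        cases hh : (bHitsFrom rest (s + 1)).head? with
        | none => simp only [Option.getD_none]; omega
        | some x =>
          have := bHitsFrom_mem_ge rest (s + 1) x (List.mem_of_mem_head? hh)
          simp only [Option.getD_some]; omega
      set j := (bHitsFrom rest (s + 1)).head?.getD (s + 1 + rest.length) with hj
      clear_value j
      rw [if_pos hge]
      by_cases hj1 : j ≥ s + 2
      · rw [if_pos (by omega)]
        have hidx : j - 1 - s = ((j - 1 - s).toNat : Int) := by omega
        have hidx' : j - 1 - (s + 1) = (((j - 1 - s).toNat - 1 : Nat) : Int) := by omega
        rw [hidx, hidx', PySem.List.pyGet?_natCast, PySem.List.pyGet?_natCast]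
        rw [show (j - 1 - s).toNat = ((j - 1 - s).toNat - 1) + 1 by omega]
        simp [List.getElem?_cons_succ]
      · rw [if_neg (by omega)]
        have hz : j - 1 - s = ((0 : Nat) : Int) := by omega
        rw [hz, PySem.List.pyGet?_natCast]
        simp

-- ===== VERDICT (by name: the statement is the Claim_ definition above) =====
theorem parse_error_stack_spec : Claim_equal_parse_error_stack := by
  intro stack _
  unfold Spec_parse_error_stack parse_error_stack parse_error_stack_alt
  rw [slice_step_two, Option.getD_some, loopA_eq_scan]
  rw [scan_eq_hits _ 0]
  simp [bHits, bHitsFrom]
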